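-- pv_equiv track=rewrite | github.com/beautiful-numbers/lehmer-lean | scripts/axle_manifest.py | namespace_prefixes_from_imports
-- ===== SOURCE A (Python) =====
-- from typing import Any, Dict, List, Optional, Sequence, Set, Tuple
--
-- def namespace_prefixes_from_imports(detected_imports: Sequence[Any]) -> List[str]:
--     prefixes: List[str] = []
--     seen: Set[str] = set()
--
--     def add(prefix: str) -> None:
--         prefix = prefix.strip().strip(".")
--         if not prefix:
--             return
--         if prefix in seen:
--             return
--         prefixes.append(prefix)
--         seen.add(prefix)
--
--     for prefix in [
--         "Lehmer.Basic",
--         "Lehmer.Pipeline",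
--         "Lehmer.Audit",
--         "Lehmer.Pivot",
--         "Lehmer.CaseB",
--         "Lehmer.CaseC",
--     ]:
--         add(prefix)
--
--     for raw in detected_imports:
--         if not isinstance(raw, str):
--             continue
--
--         imp = raw.strip()
--         if not imp.startswith("Lehmer."):
--             continue
--
--         parts = imp.split(".")
--
--         for end in range(len(parts), 1, -1):
--             add(".".join(parts[:end]))
--
--     return prefixes
-- ===== SOURCE B (Python) =====
-- def namespace_prefixes_from_imports(detected_imports):
--     # Phase 1: collect candidates; each import's dotted prefixes are built by one
--     # left-to-right accumulation of a growing string (no re-joining of slices),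
--     # then emitted longest-first by reversing.
--     candidates = ["Lehmer.Basic", "Lehmer.Pipeline", "Lehmer.Audit",
--                   "Lehmer.Pivot", "Lehmer.CaseB", "Lehmer.CaseC"]
--     for raw in detected_imports:
--         if not isinstance(raw, str):
--             continue
--         imp = raw.strip()
--         if not imp.startswith("Lehmer."):
--             continue
--         parts = imp.split(".")
--         running = parts[0]
--         grown = []
--         for part in parts[1:]:
--             running = running + "." + part
--             grown.append(running)
--         candidates.extend(reversed(grown))
--     # Phase 2: normalize, drop empties, dedup keeping first occurrence.
--     normalized = [c.strip().strip(".") for c in candidates]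
--     return list(dict.fromkeys(n for n in normalized if n))
-- ===== Notes on version B (the rewrite author's own statement) =====
-- stated objective: alternative
-- what changed: A builds each import's prefixes by re-joining slices parts[:end] for descending end and dedups on the fly with an inline add() helper over a running list+set pair; B builds each import's prefixes by a single left-to-right accumulation of one growing string (appending '.'+part each step), reverses them, collects everything into one flat candidate list, and only then normalizes/filters and dedups once with dict.fromkeys.
import Mathlib
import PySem

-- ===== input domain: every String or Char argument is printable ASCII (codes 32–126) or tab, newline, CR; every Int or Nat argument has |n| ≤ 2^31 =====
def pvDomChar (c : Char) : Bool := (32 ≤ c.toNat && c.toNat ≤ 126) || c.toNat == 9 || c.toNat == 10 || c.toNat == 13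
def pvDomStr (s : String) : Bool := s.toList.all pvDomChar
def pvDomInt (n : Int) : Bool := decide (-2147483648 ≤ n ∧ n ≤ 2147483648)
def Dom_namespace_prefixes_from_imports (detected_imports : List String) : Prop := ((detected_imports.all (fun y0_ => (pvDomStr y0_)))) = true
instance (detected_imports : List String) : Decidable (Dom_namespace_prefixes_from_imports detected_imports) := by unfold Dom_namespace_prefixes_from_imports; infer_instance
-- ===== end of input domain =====

-- B builds each import's prefixes by one left-to-right accumulation of a growing string (then reversed) instead of re-joining slices per end, and dedups once at the end instead of A's inline add()/running-set; objective: alternative decomposition, not claimed faster.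


-- ===== PORT A =====
-- A's inline helper add(prefix): normalize, skip empty or seen, else append to both.
def pvAddA (st : List String × PySem.Set String) (p : String) : List String × PySem.Set String :=
  let p := PySem.Str.stripChars (PySem.Str.strip p) "."
  if p = "" then st
  else if PySem.Set.contains st.2 p then st
  else (st.1 ++ [p], PySem.Set.add st.2 p)

def namespace_prefixes_from_imports (detected_imports : List String) : List String :=
  let st0 : List String × PySem.Set String := ([], PySem.Set.empty)
  let st1 := ["Lehmer.Basic", "Lehmer.Pipeline", "Lehmer.Audit",
              "Lehmer.Pivot", "Lehmer.CaseB", "Lehmer.CaseC"].foldl pvAddA st0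
  let st2 := detected_imports.foldl (fun st raw =>
    let imp := PySem.Str.strip raw
    if PySem.Str.startswith imp "Lehmer." then
      let parts := (PySem.Str.split? imp ".").getD []
      (PySem.List.pyRange (parts.length : Int) 1 (-1)).foldl
        (fun st e => pvAddA st (PySem.Str.join "." (PySem.List.slice parts none (some e)))) st
    else st) st1
  st2.1

-- ===== PORT B =====
-- Python's str concatenation a + b, exact (String.ofList of the concatenated char lists).
def pvCat (a b : String) : String := String.ofList (a.toList ++ b.toList)

-- one step of B's inner accumulation: running = running + "." + part; grown.append(running)
def pvStep (st : String × List String) (part : String) : String × List String :=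
  let running := pvCat (pvCat st.1 ".") part
  (running, st.2 ++ [running])

def namespace_prefixes_from_imports_alt (detected_imports : List String) : List String :=
  let candidates := detected_imports.foldl (fun acc raw =>
    let imp := PySem.Str.strip raw
    if PySem.Str.startswith imp "Lehmer." then
      let parts := (PySem.Str.split? imp ".").getD []
      -- running = parts[0] (split('.') always yields ≥ 1 part, so the default is never used)
      let st := (parts.drop 1).foldl pvStep (PySem.List.pyGetD parts 0 "", ([] : List String))
      acc ++ st.2.reverse
    else acc)
    ["Lehmer.Basic", "Lehmer.Pipeline", "Lehmer.Audit",
     "Lehmer.Pivot", "Lehmer.CaseB", "Lehmer.CaseC"]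
  let normalized := candidates.map (fun c => PySem.Str.stripChars (PySem.Str.strip c) ".")
  PySem.List.dedup (normalized.filter (fun n => n ≠ ""))

-- ===== PRECONDITION & SPEC =====
def Spec_namespace_prefixes_from_imports (detected_imports : List String) (out : List String) : Prop := out = namespace_prefixes_from_imports_alt detected_imports
instance (detected_imports : List String) (out : List String) : Decidable (Spec_namespace_prefixes_from_imports detected_imports out) := by unfold Spec_namespace_prefixes_from_imports; infer_instance

-- ===== CLAIM (what is proved, stated in full; the proofs are below) =====
def Claim_equal_namespace_prefixes_from_imports : Prop := ∀ (detected_imports : List String), Dom_namespace_prefixes_from_imports detected_imports → Spec_namespace_prefixes_from_imports detected_imports (namespace_prefixes_from_imports detected_imports)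

-- ===== LEMMAS AND PROOFS =====

-- normalization of one candidate
def pvNorm (c : String) : String := PySem.Str.stripChars (PySem.Str.strip c) "."

-- "normalize-filter then fold Set.add" — the shared shape both sides reduce to
def pvNfa (l : List String) (s : PySem.Set String) : PySem.Set String :=
  ((l.map pvNorm).filter (fun n => n ≠ "")).foldl PySem.Set.add s

-- candidate prefixes generated from one raw import (A's order: ends descending)
def pvGen (raw : String) : List String :=
  let imp := PySem.Str.strip raw
  if PySem.Str.startswith imp "Lehmer." then
    let parts := (PySem.Str.split? imp ".").getD []
    (PySem.List.pyRange (parts.length : Int) 1 (-1)).map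
      (fun e => PySem.Str.join "." (PySem.List.slice parts none (some e)))
  else []

theorem pvNfa_append (a b : List String) (s : PySem.Set String) :
    pvNfa (a ++ b) s = pvNfa b (pvNfa a s) := by
  simp [pvNfa, List.map_append, List.filter_append, List.foldl_append]

theorem pvAddA_diag (s : PySem.Set String) (p : String) :
    pvAddA (s, s) p = (pvNfa [p] s, pvNfa [p] s) := by
  simp only [pvAddA, pvNfa, pvNorm, List.map, List.filter_cons, List.filter_nil]
  by_cases h : PySem.Str.stripChars (PySem.Str.strip p) "." = ""
  · simp [h]
  · by_cases hc : PySem.Str.stripChars (PySem.Str.strip p) "." ∈ s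
    · have hcc : PySem.Set.contains s (PySem.Str.stripChars (PySem.Str.strip p) ".") = true := by
        simp [PySem.Set.contains, hc]
      simp only [h, if_false, hcc, if_true]
      simp [h, PySem.Set.add, hc]
    · have hcc : PySem.Set.contains s (PySem.Str.stripChars (PySem.Str.strip p) ".") = false := by
        simp [PySem.Set.contains, hc]
      simp only [h, if_false, hcc]
      simp [h, PySem.Set.add, hc]

theorem pvFoldA_diag (l : List String) (s : PySem.Set String) :
    l.foldl pvAddA (s, s) = (pvNfa l s, pvNfa l s) := by
  induction l generalizing s with
  | nil => simp [pvNfa]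
  | cons p t ih =>
      have : pvNfa (p :: t) s = pvNfa t (pvNfa [p] s) := pvNfa_append [p] t s
      rw [List.foldl_cons, pvAddA_diag, ih, this]

theorem pvGen_pos (raw : String)
    (h : PySem.Str.startswith (PySem.Str.strip raw) "Lehmer." = true) :
    pvGen raw = (PySem.List.pyRange (((PySem.Str.split? (PySem.Str.strip raw) ".").getD []).length : Int) 1 (-1)).map
      (fun e => PySem.Str.join "." (PySem.List.slice ((PySem.Str.split? (PySem.Str.strip raw) ".").getD []) none (some e))) := by
  simp only [pvGen]
  rw [if_pos h]

theorem pvGen_neg (raw : String)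
    (h : PySem.Str.startswith (PySem.Str.strip raw) "Lehmer." = false) :
    pvGen raw = [] := by
  simp only [pvGen]
  rw [if_neg (fun hc => Bool.false_ne_true (h.symm.trans hc))]

theorem pvOuter_diag (ds : List String) (s : PySem.Set String) :
    ds.foldl (fun st raw =>
      let imp := PySem.Str.strip raw
      if PySem.Str.startswith imp "Lehmer." then
        let parts := (PySem.Str.split? imp ".").getD []
        (PySem.List.pyRange (parts.length : Int) 1 (-1)).foldl
          (fun st e => pvAddA st (PySem.Str.join "." (PySem.List.slice parts none (some e)))) st
      else st) (s, s)
    = (pvNfa (ds.flatMap pvGen) s, pvNfa (ds.flatMap pvGen) s) := by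
  induction ds generalizing s with
  | nil => rfl
  | cons raw t ih =>
      simp only [List.foldl_cons, List.flatMap_cons]
      rw [pvNfa_append]
      by_cases h : PySem.Str.startswith (PySem.Str.strip raw) "Lehmer." = true
      · rw [if_pos h, pvGen_pos raw h,
          ← List.foldl_map
            (f := fun e => PySem.Str.join "." (PySem.List.slice ((PySem.Str.split? (PySem.Str.strip raw) ".").getD []) none (some e)))
            (g := pvAddA),
          pvFoldA_diag, ih]
      · simp only [Bool.not_eq_true] at h
        rw [if_neg (fun hc => Bool.false_ne_true (h.symm.trans hc)), pvGen_neg raw h, ih]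
        rfl

-- ---- B-side lemmas ----

theorem pvCat_toList (a b : String) : (pvCat a b).toList = a.toList ++ b.toList := by
  simp [pvCat]

-- Chars.join over a snoc, for a nonempty prefix list
theorem pvCharsJoin_snoc (sep q : List Char) (l : List (List Char)) (h : l ≠ []) :
    PySem.Chars.join sep (l ++ [q]) = PySem.Chars.join sep l ++ sep ++ q := by
  induction l with
  | nil => exact absurd rfl h
  | cons x t ih =>
      cases t with
      | nil => simp [PySem.Chars.join_cons_cons, PySem.Chars.join_singleton]
      | cons y u =>
          have := ih (by simp)
          simp only [List.cons_append, PySem.Chars.join_cons_cons]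
          rw [List.cons_append] at this
          rw [this]
          simp [List.append_assoc]

theorem pvJoin_snoc (pref : List String) (p : String) (h : pref ≠ []) :
    pvCat (pvCat (PySem.Str.join "." pref) ".") p = PySem.Str.join "." (pref ++ [p]) := by
  apply String.toList_inj.mp
  rw [pvCat_toList, pvCat_toList, PySem.Str.toList_join, PySem.Str.toList_join]
  rw [List.map_append, List.map_singleton]
  rw [pvCharsJoin_snoc _ _ _ (by simpa using h)]

theorem pvJoin_singleton (p : String) : PySem.Str.join "." [p] = p := by
  apply String.toList_inj.mp
  rw [PySem.Str.toList_join, List.map_singleton, PySem.Chars.join_singleton]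

-- B's inner accumulation characterized: it emits the ascending dotted prefixes
theorem pvStepFold (t : List String) (pref : List String) (acc : List String) (h : pref ≠ []) :
    t.foldl pvStep (PySem.Str.join "." pref, acc)
    = (PySem.Str.join "." (pref ++ t),
       acc ++ (List.range t.length).map (fun i => PySem.Str.join "." (pref ++ t.take (i + 1)))) := by
  induction t generalizing pref acc with
  | nil => simp
  | cons p t ih =>
      rw [List.foldl_cons]
      show t.foldl pvStep (pvCat (pvCat (PySem.Str.join "." pref) ".") p,
        acc ++ [pvCat (pvCat (PySem.Str.join "." pref) ".") p]) = _
      rw [pvJoin_snoc pref p h, ih (pref ++ [p]) _ (by simp)]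
      simp only [Prod.mk.injEq]
      refine ⟨by simp, ?_⟩
      rw [List.length_cons, List.range_succ_eq_map, List.map_cons, List.map_map,
        List.append_assoc, List.singleton_append]
      refine congrArg (fun l => acc ++ l) ?_
      refine List.cons_eq_cons.mpr ⟨by simp, ?_⟩
      apply List.map_congr_left
      intro i _
      simp [Function.comp, List.append_assoc]

-- B's per-import contribution equals A's pvGen
theorem pvGrownRev (parts : List String) :
    (((parts.drop 1).foldl pvStep (PySem.List.pyGetD parts 0 "", ([] : List String))).2).reverse
    = (PySem.List.pyRange (parts.length : Int) 1 (-1)).map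
        (fun e => PySem.Str.join "." (PySem.List.slice parts none (some e))) := by
  cases parts with
  | nil =>
      rw [PySem.List.pyRange_neg_one_eq_nil (by norm_num)]
      rfl
  | cons p0 rest =>
      have h0 : PySem.List.pyGetD (p0 :: rest) 0 "" = p0 := by
        simp [PySem.List.pyGetD_zero_cons]
      rw [List.drop_one, List.tail_cons, h0, ← pvJoin_singleton p0,
        pvStepFold rest [p0] [] (by simp), pvJoin_singleton]
      simp only [List.nil_append]
      rw [PySem.List.pyRange_neg_one_eq_reverse, List.map_reverse]
      congr 1
      rw [PySem.List.pyRange_one]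
      have hlen : (((p0 :: rest).length : Int) + 1 - (1 + 1)).toNat = rest.length := by
        simp only [List.length_cons]
        omega
      rw [hlen, List.map_map]
      apply List.map_congr_left
      intro i _
      have hs : PySem.List.slice (p0 :: rest) none (some ((1 : Int) + 1 + (i : Int)))
          = (p0 :: rest).take ((1 : Int) + 1 + (i : Int)).toNat := by
        exact PySem.List.slice_to _ (by omega)
      simp only [Function.comp]
      rw [hs]
      have ht : ((1 : Int) + 1 + (i : Int)).toNat = i + 2 := by omega
      rw [ht]
      simp [List.take_succ_cons]

-- B's candidate fold = seeds ++ flatMap pvGen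
theorem pvCandidatesB_eq (ds : List String) (acc : List String) :
    ds.foldl (fun acc raw =>
      let imp := PySem.Str.strip raw
      if PySem.Str.startswith imp "Lehmer." then
        let parts := (PySem.Str.split? imp ".").getD []
        let st := (parts.drop 1).foldl pvStep (PySem.List.pyGetD parts 0 "", ([] : List String))
        acc ++ st.2.reverse
      else acc) acc = acc ++ ds.flatMap pvGen := by
  induction ds generalizing acc with
  | nil => rw [List.foldl_nil, List.flatMap_nil, List.append_nil]
  | cons raw t ih =>
      simp only [List.foldl_cons, List.flatMap_cons]
      by_cases h : PySem.Str.startswith (PySem.Str.strip raw) "Lehmer." = true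
      · rw [if_pos h, ih, pvGrownRev, ← pvGen_pos raw h, List.append_assoc]
      · simp only [Bool.not_eq_true] at h
        rw [if_neg (fun hc => Bool.false_ne_true (h.symm.trans hc)), ih, pvGen_neg raw h]
        rfl

-- ===== VERDICT (by name: the statement is the Claim_ definition above) =====
theorem namespace_prefixes_from_imports_spec : Claim_equal_namespace_prefixes_from_imports := by
  intro ds _
  show namespace_prefixes_from_imports ds = namespace_prefixes_from_imports_alt ds
  simp only [namespace_prefixes_from_imports, namespace_prefixes_from_imports_alt]
  rw [pvCandidatesB_eq]
  have hseeds : (["Lehmer.Basic", "Lehmer.Pipeline", "Lehmer.Audit",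
      "Lehmer.Pivot", "Lehmer.CaseB", "Lehmer.CaseC"].foldl pvAddA
      (([] : List String), (PySem.Set.empty : PySem.Set String)))
      = (pvNfa ["Lehmer.Basic", "Lehmer.Pipeline", "Lehmer.Audit",
          "Lehmer.Pivot", "Lehmer.CaseB", "Lehmer.CaseC"] PySem.Set.empty,
         pvNfa ["Lehmer.Basic", "Lehmer.Pipeline", "Lehmer.Audit",
          "Lehmer.Pivot", "Lehmer.CaseB", "Lehmer.CaseC"] PySem.Set.empty) := by
    have := pvFoldA_diag ["Lehmer.Basic", "Lehmer.Pipeline", "Lehmer.Audit",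
      "Lehmer.Pivot", "Lehmer.CaseB", "Lehmer.CaseC"] PySem.Set.empty
    simpa [PySem.Set.empty] using this
  rw [hseeds, pvOuter_diag]
  rw [PySem.List.dedup_eq_ofList, PySem.Set.ofList_eq_foldl]
  simp only [List.map_append, List.filter_append, List.foldl_append]
  rfl
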